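-- pv_equiv track=rewrite | github.com/JungYeonHwi/Algorithm_Study | programmers_python/secret map.py | solution
-- ===== SOURCE A (Python) =====
-- def solution(n, arr1, arr2):
--     answer = []
--
--     result = [[" "] * n for i in range(n)]
--     arr1map = []
--     arr2map = []
--
--     for i in arr1 :
--         tmp = list(map(int, str(bin(i)[2:])))
--         while len(tmp) < n : tmp.insert(0, 0)
--         arr1map.append(tmp)
--
--     for i in arr2 :
--         tmp = list(map(int, str(bin(i)[2:])))
--         while len(tmp) < n : tmp.insert(0, 0)
--         arr2map.append(tmp)
--
--     for rkfh in range(0, n) :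
--         for tpfh in range(0, n) :
--             if (arr1map[rkfh][tpfh] == 1) : result[rkfh][tpfh] = "#"
--             if (arr2map[rkfh][tpfh] == 1) : result[rkfh][tpfh] = "#"
--
--     for i in range(0, n) :
--         one = ''
--         for j in range(0, n) :
--             one += result[i][j]
--
--         answer.append(one)
--
--     return answer
-- ===== SOURCE B (Python) =====
-- def solution(n, arr1, arr2):
--     answer = []
--     for i in range(n):
--         s1 = format(arr1[i], '0{}b'.format(n))
--         s2 = format(arr2[i], '0{}b'.format(n))
--         answer.append(''.join('#' if s1[c] == '1' or s2[c] == '1' else ' '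
--                               for c in range(n)))
--     return answer
-- ===== Notes on version B (the rewrite author's own statement) =====
-- stated objective: idiomatic
-- what changed: B replaces A's hand-built digit matrices (bin + insert(0,0) pad loops), 2D mutable character grid and four loop nests by a per-row overlay: zero-pad each value with format(v, '0{}b') and emit '#' where either formatted string has a '1'.
import Mathlib
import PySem

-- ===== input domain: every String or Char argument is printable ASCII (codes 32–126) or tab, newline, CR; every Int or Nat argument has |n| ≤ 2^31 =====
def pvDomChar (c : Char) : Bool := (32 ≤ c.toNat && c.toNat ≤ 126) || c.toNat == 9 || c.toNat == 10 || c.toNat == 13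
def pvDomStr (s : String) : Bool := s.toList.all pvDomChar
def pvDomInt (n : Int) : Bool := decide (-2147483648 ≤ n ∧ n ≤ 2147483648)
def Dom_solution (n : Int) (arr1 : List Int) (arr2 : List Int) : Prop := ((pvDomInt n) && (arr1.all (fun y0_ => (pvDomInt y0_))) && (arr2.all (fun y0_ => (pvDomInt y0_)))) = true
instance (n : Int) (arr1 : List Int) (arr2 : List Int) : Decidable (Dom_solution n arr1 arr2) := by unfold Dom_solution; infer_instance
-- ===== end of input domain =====

-- B replaces A's hand-built digit matrices, 2D mutable character grid and four loop nests by a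
-- per-row overlay of the two zero-padded binary strings (objective: idiomatic).

-- ===== PORT A =====

-- bin(m)[2:] for m ≥ 1 (MSB-first binary digit characters); shared exact port of the builtin
def pyBinGo (m : Nat) : List Char :=
  if h : m = 0 then [] else pyBinGo (m / 2) ++ [if m % 2 = 1 then '1' else '0']
termination_by m
decreasing_by exact Nat.div_lt_self (Nat.pos_of_ne_zero h) (by omega)

-- bin(m)[2:] / format(m, 'b') for m ≥ 0 (exact on the nonnegative ints Pre_ admits)
def pyBin (m : Nat) : List Char := if m = 0 then ['0'] else pyBinGo m

-- 'while len(tmp) < n : tmp.insert(0, 0)'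
def padWhile (n : Int) (l : List Int) : List Int :=
  if (l.length : Int) < n then padWhile n (0 :: l) else l
termination_by (n - l.length).toNat
decreasing_by simp only [List.length_cons]; omega

def solution (n : Int) (arr1 : List Int) (arr2 : List Int) : List String :=
  -- result = [[" "] * n for i in range(n)]
  let result : List (List String) := (PySem.List.pyRange 0 n 1).map (fun _ => List.replicate n.toNat " ")
  -- the two 'for i in arrK' digit-matrix loops (list(map(int, str(bin(i)[2:]))) then the pad-while)
  let arr1map : List (List Int) :=
    arr1.map (fun i => padWhile n ((pyBin i.toNat).map (fun c => if c = '1' then (1:Int) else 0)))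
  let arr2map : List (List Int) :=
    arr2.map (fun i => padWhile n ((pyBin i.toNat).map (fun c => if c = '1' then (1:Int) else 0)))
  -- the double loop mutating result[rkfh][tpfh] (in-range under Pre_, so indexing uses pyGetD)
  let result : List (List String) := (PySem.List.pyRange 0 n 1).foldl (fun g rk =>
    g.set rk.toNat ((PySem.List.pyRange 0 n 1).foldl (fun row tp =>
        let row := if PySem.List.pyGetD (PySem.List.pyGetD arr1map rk []) tp 0 == 1 then row.set tp.toNat "#" else row
        if PySem.List.pyGetD (PySem.List.pyGetD arr2map rk []) tp 0 == 1 then row.set tp.toNat "#" else row)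
      (PySem.List.pyGetD g rk []))) result
  -- the final loops building 'one' by += and appending to answer
  (PySem.List.pyRange 0 n 1).foldl (fun answer i =>
    answer ++ [(PySem.List.pyRange 0 n 1).foldl (fun one j =>
      one ++ PySem.List.pyGetD (PySem.List.pyGetD result i []) j "") ""]) []

-- ===== PORT B =====

-- format(v, '0{}b'.format(n)): sign, then zeros up to width n.toNat, then the binary digits
def pyFormatB (v : Int) (n : Int) : List Char :=
  if v < 0 then
    '-' :: (List.replicate (n.toNat - ((pyBin (-v).toNat).length + 1)) '0' ++ pyBin (-v).toNat)
  else
    List.replicate (n.toNat - (pyBin v.toNat).length) '0' ++ pyBin v.toNat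

def solution_alt (n : Int) (arr1 : List Int) (arr2 : List Int) : List String :=
  (PySem.List.pyRange 0 n 1).map (fun i =>
    let s1 := pyFormatB (PySem.List.pyGetD arr1 i 0) n
    let s2 := pyFormatB (PySem.List.pyGetD arr2 i 0) n
    String.ofList ((PySem.List.pyRange 0 n 1).map (fun c =>
      if PySem.List.pyGetD s1 c ' ' == '1' || PySem.List.pyGetD s2 c ' ' == '1' then '#' else ' ')))

-- ===== PRECONDITION & SPEC =====
-- Pre_ excludes exactly the inputs on which A raises: a row list shorter than n (IndexError on
-- arrKmap[rkfh]) and negative entries (bin() yields '-0b…', so int() raises ValueError).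
def Pre_solution (n : Int) (arr1 : List Int) (arr2 : List Int) : Prop :=
  n ≤ (arr1.length : Int) ∧ n ≤ (arr2.length : Int) ∧
  (∀ x ∈ arr1, 0 ≤ x) ∧ (∀ x ∈ arr2, 0 ≤ x)
instance (n : Int) (arr1 : List Int) (arr2 : List Int) : Decidable (Pre_solution n arr1 arr2) := by
  unfold Pre_solution; infer_instance

def pvWitness_solution : Int × List Int × List Int := (2, [1, 2], [2, 1])

def Spec_solution (n : Int) (arr1 : List Int) (arr2 : List Int) (out : List String) : Prop := out = solution_alt n arr1 arr2
instance (n : Int) (arr1 : List Int) (arr2 : List Int) (out : List String) : Decidable (Spec_solution n arr1 arr2 out) := by unfold Spec_solution; infer_instance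

-- ===== CLAIM (what is proved, stated in full; the proofs are below) =====
def Claim_equal_solution : Prop := ∀ (n : Int) (arr1 : List Int) (arr2 : List Int), Dom_solution n arr1 arr2 → Pre_solution n arr1 arr2 → Spec_solution n arr1 arr2 (solution n arr1 arr2)

-- ===== LEMMAS AND PROOFS =====

-- the padding while-loop is left-padding with zeros
theorem padWhile_eq_aux (n : Int) : ∀ (k : Nat) (l : List Int), (n - l.length).toNat ≤ k →
    padWhile n l = List.replicate (n.toNat - l.length) 0 ++ l := by
  intro k
  induction k with
  | zero =>
    intro l hl
    rw [padWhile.eq_def]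
    have h1 : ¬ ((l.length : Int) < n) := by omega
    rw [if_neg h1]
    have : n.toNat - l.length = 0 := by omega
    simp [this]
  | succ k ih =>
    intro l hl
    rw [padWhile.eq_def]
    by_cases h1 : (l.length : Int) < n
    · rw [if_pos h1, ih (0 :: l) (by simp; omega)]
      have h2 : n.toNat - l.length = (n.toNat - (0 :: l).length) + 1 := by simp; omega
      rw [h2, List.replicate_succ']
      simp
    · rw [if_neg h1]
      have : n.toNat - l.length = 0 := by omega
      simp [this]

theorem padWhile_eq (n : Int) (l : List Int) :
    padWhile n l = List.replicate (n.toNat - l.length) 0 ++ l :=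
  padWhile_eq_aux n (n - l.length).toNat l le_rfl

-- A's per-element digit row is the int rendering of the zero-padded binary character string
theorem digitRow (n : Int) (m : Nat) :
    padWhile n ((pyBin m).map (fun c => if c = '1' then (1:Int) else 0))
      = (List.replicate (n.toNat - (pyBin m).length) '0' ++ pyBin m).map
          (fun c => if c = '1' then (1:Int) else 0) := by
  rw [padWhile_eq, List.map_append]
  simp

-- generic loop over range k that sets index i to F i (current value at i)
theorem foldl_set_range {α : Type} (d : α) (F : Nat → α → α) :
    ∀ (k : Nat) (g : List α),
      ((List.range k).foldl (fun g i => g.set i (F i (g.getD i d))) g).length = g.length ∧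
      ∀ j, ((List.range k).foldl (fun g i => g.set i (F i (g.getD i d))) g).getD j d
            = if j < k ∧ j < g.length then F j (g.getD j d) else g.getD j d := by
  intro k
  induction k with
  | zero => intro g; simp
  | succ k ih =>
    intro g
    obtain ⟨ihl, ihv⟩ := ih g
    rw [List.range_succ, List.foldl_append]
    simp only [List.foldl_cons, List.foldl_nil]
    set out := (List.range k).foldl (fun g i => g.set i (F i (g.getD i d))) g with hout
    constructor
    · simp [ihl]
    · intro j
      have hk := ihv k
      have hj := ihv j
      by_cases hjk : j = k
      · subst hjk
        by_cases hlt : j < g.length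
        · rw [List.getD_eq_getElem?_getD, List.getElem?_set_self (by omega), hk]
          simp [hlt]
        · rw [List.getD_eq_getElem?_getD, List.getElem?_set, if_pos rfl,
            if_neg (by rw [ihl]; omega)]
          rw [if_neg (by omega)]
          have hnone : g[j]? = none := List.getElem?_eq_none (by omega)
          simp [List.getD_eq_getElem?_getD, hnone]
      · rw [List.getD_eq_getElem?_getD, List.getElem?_set_ne (by omega), ← List.getD_eq_getElem?_getD, hj]
        by_cases h1 : j < k ∧ j < g.length
        · rw [if_pos h1, if_pos ⟨by omega, h1.2⟩]
        · have h2 : ¬ (j < k + 1 ∧ j < g.length) := by omega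
          rw [if_neg h1, if_neg h2]

-- the two conditional '#' writes of the inner loop are one conditional set
theorem rowStep_eq (p1 p2 : Bool) (row : List String) (c : Nat) :
    (if p2 then (if p1 then row.set c "#" else row).set c "#" else (if p1 then row.set c "#" else row))
      = row.set c (if p1 || p2 then "#" else row.getD c " ") := by
  cases p1 <;> cases p2 <;> simp [List.set_set]
  by_cases hc : c < row.length
  · simp [List.getElem?_eq_getElem hc]
  · rw [List.set_eq_of_length_le (by omega)]

-- string built by repeated '+=' of one-character strings
theorem strFold (g : Nat → Char) :
    ∀ (k : Nat) (s : String),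
      (List.range k).foldl (fun s c => s ++ String.ofList [g c]) s
        = s ++ String.ofList ((List.range k).map g) := by
  intro k
  induction k with
  | zero => intro s; simp
  | succ k ih =>
    intro s
    rw [List.range_succ, List.foldl_append, ih, List.map_append]
    simp only [List.foldl_cons, List.foldl_nil, String.ofList_append, String.append_assoc,
      List.map_singleton]

-- value of the doubly-mutated result grid at row r, column c
theorem gridVal (p1 p2 : Nat → Nat → Bool) (N : Nat) :
    ∀ r, r < N → ∀ c, c < N →
      ((((List.range N).foldl (fun g rk => g.set rk ((List.range N).foldl (fun row tp =>
            if p2 rk tp then (if p1 rk tp then row.set tp "#" else row).set tp "#"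
            else (if p1 rk tp then row.set tp "#" else row)) (g.getD rk [])))
          ((List.range N).map (fun _ => List.replicate N " "))).getD r []).getD c "")
        = (if p1 r c || p2 r c then "#" else " ") := by
  intro r hr c hc
  simp only [rowStep_eq]
  have hG0get : ((List.range N).map (fun _ => List.replicate N (" ":String))).getD r []
      = List.replicate N " " := by
    rw [List.getD_eq_getElem _ _ (by simpa using hr)]
    simp
  have hgrid := foldl_set_range ([] : List String)
      (fun rk row => (List.range N).foldl (fun row tp =>
        row.set tp (if p1 rk tp || p2 rk tp then "#" else row.getD tp " ")) row)
      N ((List.range N).map (fun _ => List.replicate N " "))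
  rw [hgrid.2 r, if_pos ⟨hr, by simpa using hr⟩, hG0get]
  have hrow := foldl_set_range (" ":String)
      (fun tp x => if p1 r tp || p2 r tp then "#" else x) N (List.replicate N " ")
  have hrowlen : ((List.range N).foldl (fun row tp =>
      row.set tp (if p1 r tp || p2 r tp then "#" else row.getD tp " ")) (List.replicate N " ")).length = N := by
    rw [hrow.1]; simp
  rw [List.getD_eq_getElem _ _ (by rw [hrowlen]; exact hc)]
  have h2 := hrow.2 c
  rw [List.getD_eq_getElem _ _ (by rw [hrowlen]; exact hc)] at h2
  rw [h2, if_pos ⟨hc, by simpa using hc⟩, List.getD_replicate _ hc]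

-- ===== VERDICT (by name: the statement is the Claim_ definition above) =====
theorem solution_spec : Claim_equal_solution := by
  intro n arr1 arr2 _ hpre
  obtain ⟨hlen1, hlen2, hpos1, hpos2⟩ := hpre
  unfold Spec_solution solution solution_alt
  have hrange : PySem.List.pyRange 0 n 1 = (List.range n.toNat).map (fun (k : Nat) => ((k : Nat) : Int)) := by
    rw [PySem.List.pyRange_one]
    have h0 : (n - 0).toNat = n.toNat := by omega
    rw [h0]
    apply List.map_congr_left
    intro k _
    omega
  rw [hrange]
  simp only [List.foldl_map, List.map_map, PySem.List.pyGetD_natCast, Int.toNat_natCast]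
  rw [PySem.List.foldl_append_singleton_eq_map]
  rw [List.nil_append]
  apply List.map_congr_left
  intro r hrm
  have hr : r < n.toNat := by simpa using hrm
  have hr1 : r < arr1.length := by omega
  have hr2 : r < arr2.length := by omega
  have hba : 0 ≤ arr1[r] := hpos1 _ (List.getElem_mem hr1)
  have hbb : 0 ≤ arr2[r] := hpos2 _ (List.getElem_mem hr2)
  simp only [Function.comp_def, PySem.List.pyGetD_natCast]
  rw [List.getD_eq_getElem _ _ hr1, List.getD_eq_getElem _ _ hr2]
  -- the two formatted strings of row r, and their int renderings in A's matrices
  have hfmt1 : pyFormatB arr1[r] n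
      = List.replicate (n.toNat - (pyBin arr1[r].toNat).length) '0' ++ pyBin arr1[r].toNat := by
    rw [pyFormatB, if_neg (not_lt.mpr hba)]
  have hfmt2 : pyFormatB arr2[r] n
      = List.replicate (n.toNat - (pyBin arr2[r].toNat).length) '0' ++ pyBin arr2[r].toNat := by
    rw [pyFormatB, if_neg (not_lt.mpr hbb)]
  have hslen1 : n.toNat ≤ (pyFormatB arr1[r] n).length := by rw [hfmt1]; simp; omega
  have hslen2 : n.toNat ≤ (pyFormatB arr2[r] n).length := by rw [hfmt2]; simp; omega
  have hdig1 : (List.map (fun i => padWhile n ((pyBin i.toNat).map (fun c => if c = '1' then (1:Int) else 0))) arr1).getD r []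
      = (pyFormatB arr1[r] n).map (fun c => if c = '1' then (1:Int) else 0) := by
    rw [List.getD_eq_getElem _ _ (by simpa using hr1), List.getElem_map, digitRow, hfmt1]
  have hdig2 : (List.map (fun i => padWhile n ((pyBin i.toNat).map (fun c => if c = '1' then (1:Int) else 0))) arr2).getD r []
      = (pyFormatB arr2[r] n).map (fun c => if c = '1' then (1:Int) else 0) := by
    rw [List.getD_eq_getElem _ _ (by simpa using hr2), List.getElem_map, digitRow, hfmt2]
  -- A's row string, character by character
  rw [PySem.List.foldl_congr_mem (List.range n.toNat) _
      (fun one c => one ++ String.ofList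
        [if (pyFormatB arr1[r] n).getD c ' ' == '1' || (pyFormatB arr2[r] n).getD c ' ' == '1' then '#' else ' '])
      "" ?hcong]
  rw [strFold]
  rw [String.empty_append]
  case hcong =>
    intro acc c hcm
    have hc : c < n.toNat := by simpa using hcm
    rw [gridVal
        (fun rk tp => ((List.map (fun i => padWhile n ((pyBin i.toNat).map (fun c => if c = '1' then (1:Int) else 0))) arr1).getD rk []).getD tp 0 == 1)
        (fun rk tp => ((List.map (fun i => padWhile n ((pyBin i.toNat).map (fun c => if c = '1' then (1:Int) else 0))) arr2).getD rk []).getD tp 0 == 1)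
        n.toNat r hr c hc]
    simp only [hdig1, hdig2]
    rw [List.getD_eq_getElem _ _ (by simp; omega), List.getD_eq_getElem _ _ (by simp; omega),
      List.getD_eq_getElem _ _ (by omega), List.getD_eq_getElem _ _ (by omega),
      List.getElem_map, List.getElem_map]
    by_cases h1 : (pyFormatB arr1[r] n)[c] = '1' <;>
      by_cases h2 : (pyFormatB arr2[r] n)[c] = '1' <;>
        simp [h1, h2]
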